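-- pv_equiv track=rewrite | github.com/jfm-data/NHLwagers | streamlit_Team.py | trips
-- ===== SOURCE A (Python) =====
-- def trips(home_or_away, TeamChange, Site):
--      list =[]
--      x = 0
--      for i, j in zip(TeamChange, Site):
--          if i == False:
--              x = x
--          else:
--              x = 0
--          if j == home_or_away:
--              x += 1
--          else:
--              x = 0
--          list.append(x)
--      return list
-- ===== SOURCE B (Python) =====
-- def trips(home_or_away, TeamChange, Site):
--     # value at k is the distance from k to the last break position
--     last = -1
--     out = []
--     for k, (i, j) in enumerate(zip(TeamChange, Site)):
--         if j != home_or_away: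
--             last = k
--         elif i != False:
--             last = k - 1
--         out.append(k - last)
--     return out
-- ===== Notes on version B (the rewrite author's own statement) =====
-- stated objective: alternative
-- what changed: Instead of maintaining A's running streak counter that is conditionally reset and incremented, B tracks only the index of the last break position and emits k - last at each step, deriving the streak by index arithmetic.
import Mathlib
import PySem

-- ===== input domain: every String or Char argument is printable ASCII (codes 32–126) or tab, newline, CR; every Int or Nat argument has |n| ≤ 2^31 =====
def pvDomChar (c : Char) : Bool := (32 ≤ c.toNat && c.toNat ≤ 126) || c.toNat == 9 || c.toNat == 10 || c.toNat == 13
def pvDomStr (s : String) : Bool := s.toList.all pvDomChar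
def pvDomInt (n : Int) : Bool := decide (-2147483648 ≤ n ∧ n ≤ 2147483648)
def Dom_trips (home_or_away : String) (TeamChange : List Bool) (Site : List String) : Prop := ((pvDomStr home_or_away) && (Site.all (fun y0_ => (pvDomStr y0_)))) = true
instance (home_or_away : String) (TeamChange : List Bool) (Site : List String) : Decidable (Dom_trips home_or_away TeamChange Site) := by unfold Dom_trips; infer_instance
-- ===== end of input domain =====

-- B replaces A's running streak counter by tracking the index of the last break and emitting k - last; alternative algorithm, same cost.

-- ===== PORT A =====
def trips (home_or_away : String) (TeamChange : List Bool) (Site : List String) : List Int :=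
  ((TeamChange.zip Site).foldl
    (fun (st : List Int × Int) p =>
      let x := if p.1 = false then st.2 else 0
      let x := if p.2 = home_or_away then x + 1 else 0
      (st.1 ++ [x], x))
    ([], 0)).1

-- ===== PORT B =====
def trips_alt (home_or_away : String) (TeamChange : List Bool) (Site : List String) : List Int :=
  (((TeamChange.zip Site).zipIdx 0).foldl
    (fun (st : Int × List Int) pk =>
      let k : Int := pk.2
      let last := if pk.1.2 ≠ home_or_away then k
                  else if pk.1.1 ≠ false then k - 1
                  else st.1
      (last, st.2 ++ [k - last]))
    (-1, [])).2

-- ===== PRECONDITION & SPEC =====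
def Spec_trips (home_or_away : String) (TeamChange : List Bool) (Site : List String) (out : List Int) : Prop := out = trips_alt home_or_away TeamChange Site
instance (home_or_away : String) (TeamChange : List Bool) (Site : List String) (out : List Int) : Decidable (Spec_trips home_or_away TeamChange Site out) := by unfold Spec_trips; infer_instance

-- ===== CLAIM (what is proved, stated in full; the proofs are below) =====
def Claim_equal_trips : Prop := ∀ (home_or_away : String) (TeamChange : List Bool) (Site : List String), Dom_trips home_or_away TeamChange Site → Spec_trips home_or_away TeamChange Site (trips home_or_away TeamChange Site)

-- ===== LEMMAS AND PROOFS =====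
-- Invariant: A's running counter x equals k - 1 - last, where last is B's last-break index at step k.
lemma trips_inv (h : String) (ps : List (Bool × String)) :
    ∀ (k : Nat) (last x : Int) (accA accB : List Int),
      accA = accB → x = (k : Int) - 1 - last →
      (ps.foldl
        (fun (st : List Int × Int) p =>
          let y := if p.1 = false then st.2 else 0
          let y := if p.2 = h then y + 1 else 0
          (st.1 ++ [y], y)) (accA, x)).1
      =
      ((ps.zipIdx k).foldl
        (fun (st : Int × List Int) pk =>
          let kk : Int := pk.2
          let last := if pk.1.2 ≠ h then kk
                      else if pk.1.1 ≠ false then kk - 1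
                      else st.1
          (last, st.2 ++ [kk - last])) (last, accB)).2 := by
  induction ps with
  | nil => intro k last x accA accB hacc _; simpa using hacc
  | cons p rest ih =>
      intro k last x accA accB hacc hx
      obtain ⟨i, j⟩ := p
      simp only [List.zipIdx_cons, List.foldl_cons]
      by_cases hj : j = h
      · by_cases hi : i = false
        · simp only [hj, hi, ne_eq, not_true_eq_false, if_false, if_true]
          refine ih (k + 1) last (x + 1) _ _ ?_ ?_
          · rw [hacc, show x + 1 = (k : Int) - last from by omega]
          · push_cast; omega
        · have hi' : i = true := by simpa using hi
          simp only [hj, hi', ne_eq, not_true_eq_false, if_false, Bool.true_eq_false,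
            not_false_eq_true, if_true]
          refine ih (k + 1) ((k : Int) - 1) ((0 : Int) + 1) _ _ ?_ ?_
          · rw [hacc, show (0 : Int) + 1 = (k : Int) - ((k : Int) - 1) from by ring]
          · push_cast; omega
      · simp only [hj, ne_eq, not_false_eq_true, if_true, if_false]
        refine ih (k + 1) (k : Int) (0 : Int) _ _ ?_ ?_
        · rw [hacc, show (0 : Int) = (k : Int) - (k : Int) from by ring]
        · push_cast; omega

-- ===== VERDICT (by name: the statement is the Claim_ definition above) =====
theorem trips_spec : Claim_equal_trips := by
  intro h tc site _
  unfold Spec_trips trips trips_alt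
  simpa using trips_inv h (tc.zip site) 0 (-1) 0 [] [] rfl (by norm_num)
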